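-- pv_equiv track=rewrite | github.com/OpenVoiceOS/ovos-buildroot | buildroot-external/rootfs-overlay/usr/lib/python3.10/site-packages/ovos_skills_manager/licenses.py | _check_template
-- ===== SOURCE A (Python) =====
-- def _check_template(lic: str, template: str) -> bool:
--     lines = [l for l in lic.lower().split("\n") if l.strip()]
--     lic = ''.join(filter(str.isalpha, lic)).lower()
--     t = ''.join(filter(str.isalpha, template)).lower()
--
--     if t == lic:
--         return True
--
--     # account for copyright in first line
--     if "copyright" in lines[0]:
--         lic = "\n".join(lines[1:])
--         return _check_template(lic, template)
--     return False
-- ===== SOURCE B (Python) =====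
-- def _check_template(lic: str, template: str) -> bool:
--     def alpha(s):
--         return ''.join(ch for ch in s if ch.isalpha()).lower()
--
--     t = alpha(template)
--     lines = [l for l in lic.lower().split("\n") if l.strip()]
--     # count the leading lines that mention "copyright": only those can be dropped
--     m = 0
--     while m < len(lines) and "copyright" in lines[m]:
--         m += 1
--     # peel the alphabetic content line by line off a single precomputed string
--     suffix = alpha(lic)
--     for k in range(m):
--         if suffix == t:
--             return True
--         suffix = suffix[len(alpha(lines[k])):]
--     return suffix == t
-- ===== Notes on version B (the rewrite author's own statement) =====
-- stated objective: alternative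
-- what changed: Replaces A's recursion (which re-joins the remaining lines and re-splits/re-filters the whole remaining text at every step) by a single pass: filter the template once, count the leading 'copyright' lines, then peel each line's alphabetic content off one precomputed alphabetic string and compare after each peel.
import Mathlib
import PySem

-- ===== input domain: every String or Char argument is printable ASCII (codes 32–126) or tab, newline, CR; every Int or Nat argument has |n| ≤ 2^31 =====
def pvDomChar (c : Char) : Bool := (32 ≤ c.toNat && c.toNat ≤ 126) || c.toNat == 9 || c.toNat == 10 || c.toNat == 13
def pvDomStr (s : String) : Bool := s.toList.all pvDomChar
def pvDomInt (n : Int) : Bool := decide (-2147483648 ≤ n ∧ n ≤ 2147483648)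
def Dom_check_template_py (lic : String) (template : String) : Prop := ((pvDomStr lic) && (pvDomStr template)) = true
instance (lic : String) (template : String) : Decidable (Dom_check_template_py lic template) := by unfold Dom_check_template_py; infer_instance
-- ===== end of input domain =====

-- B: instead of A's recursion (which re-joins the remaining lines and re-splits/re-filters the whole
-- remaining text each step), one pass: filter the template once, count the leading 'copyright' lines,
-- then peel per-line alphabetic content off a single precomputed string (alternative decomposition,
-- no speed claim). Pre_ excludes exactly the inputs where the Python A raises IndexError.


-- ===== helper lemmas the PORTS need (cited by the ports' decreasing_by via pyLines_join/lines_good) =====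
theorem char_le_iff (a b : Char) : a ≤ b ↔ a.toNat ≤ b.toNat := Iff.rfl

theorem toNat_ofNat_valid (n : Nat) (h : n < 55296) : (Char.ofNat n).toNat = n := by
  rw [Char.toNat_ofNat, if_pos (Or.inl h)]

theorem upper_toNat (c : Char) (hU : 'A' ≤ c ∧ c ≤ 'Z') : 65 ≤ c.toNat ∧ c.toNat ≤ 90 := by
  have h1 := (char_le_iff _ _).mp hU.1
  have h2 := (char_le_iff _ _).mp hU.2
  have hAA : ('A':Char).toNat = 65 := by decide
  have hZZ : ('Z':Char).toNat = 90 := by decide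
  omega

theorem lowerChar_lowerChar (c : Char) : PySem.Chars.lowerChar (PySem.Chars.lowerChar c) = PySem.Chars.lowerChar c := by
  have hZZ : ('Z':Char).toNat = 90 := by decide
  have hAA : ('A':Char).toNat = 65 := by decide
  by_cases hU : ('A' ≤ c ∧ c ≤ 'Z')
  · have hcond : (decide ('A' ≤ c) && decide (c ≤ 'Z')) = true := by
      rw [← Bool.decide_and]; exact decide_eq_true hU
    obtain ⟨h1, h2⟩ := upper_toNat c hU
    have hv : (Char.ofNat (c.toNat + 32)).toNat = c.toNat + 32 := toNat_ofNat_valid _ (by omega)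
    simp only [PySem.Chars.lowerChar, PySem.Chars.isupper, hcond, if_true]
    rw [if_neg]
    simp only [Bool.and_eq_true, decide_eq_true_eq, char_le_iff, hv, hAA, hZZ, not_and]
    intro hh
    omega
  · have hcond : (decide ('A' ≤ c) && decide (c ≤ 'Z')) = false := by
      rw [← Bool.decide_and]; exact decide_eq_false hU
    simp only [PySem.Chars.lowerChar, PySem.Chars.isupper, hcond]
    rw [if_neg Bool.false_ne_true, if_neg (by rw [hcond]; exact Bool.false_ne_true)]

def split1 : List Char → List (List Char)
  | [] => [[]]
  | c :: s => if c = '\n' then [] :: split1 s else (split1 s).modifyHead (c :: ·)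

theorem split1_ne_nil (s : List Char) : split1 s ≠ [] := by
  induction s with
  | nil => simp [split1]
  | cons c s ih =>
    simp only [split1]
    split_ifs
    · simp
    · cases h : split1 s with
      | nil => exact absurd h ih
      | cons a t => simp [List.modifyHead]

theorem go_eq (fuel : Nat) : ∀ (l : List Char), l.length < fuel → ∀ (cur : List Char) (acc : List (List Char)),
    PySem.Chars.splitOn.go ['\n'] fuel l cur acc = acc.reverse ++ (split1 l).modifyHead (cur.reverse ++ ·) := by
  induction fuel with
  | zero => intro l h; omega
  | succ fuel ih =>
    intro l h cur acc
    cases l with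
    | nil =>
      simp [PySem.Chars.splitOn.go, split1, List.modifyHead]
    | cons c rest =>
      rw [PySem.Chars.splitOn.go]
      by_cases hc : c = '\n'
      · subst hc
        rw [if_pos (by simp [List.isPrefixOf])]
        rw [ih _ (by simp at h ⊢; omega)]
        simp only [split1, List.modifyHead, List.reverse_cons]
        cases hsp : split1 rest <;> simp [hsp]
      · rw [if_neg (by simp [List.isPrefixOf]; intro hh; exact hc hh.symm)]
        rw [ih _ (by simp at h ⊢; omega)]
        simp only [split1, if_neg hc]
        cases hsp : split1 rest with
        | nil => exact absurd hsp (split1_ne_nil rest)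
        | cons a t => simp [List.modifyHead, List.append_assoc]

theorem splitOn_eq_split1 (s : List Char) : PySem.Chars.splitOn s ['\n'] = split1 s := by
  rw [PySem.Chars.splitOn, go_eq (s.length + 1) s (by omega) [] []]
  cases hsp : split1 s with
  | nil => exact absurd hsp (split1_ne_nil s)
  | cons a t => simp [List.modifyHead]


theorem mem_of_mem_split1 (s : List Char) (p : List Char) (hp : p ∈ split1 s) (c : Char) (hc : c ∈ p) : c ∈ s := by
  induction s generalizing p with
  | nil =>
    rw [show split1 [] = [[]] from rfl, List.mem_singleton] at hp
    subst hp; simp at hc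
  | cons a s ih =>
    simp only [split1] at hp
    split_ifs at hp with ha
    · rcases List.mem_cons.mp hp with rfl | hp2
      · simp at hc
      · exact List.mem_cons_of_mem _ (ih p hp2 hc)
    · cases hsp : split1 s with
      | nil => exact absurd hsp (split1_ne_nil s)
      | cons q t =>
        rw [hsp] at hp
        simp only [List.modifyHead] at hp
        rcases List.mem_cons.mp hp with rfl | hp2
        · rcases List.mem_cons.mp hc with rfl | hc2
          · exact List.mem_cons_self
          · exact List.mem_cons_of_mem _ (ih q (by rw [hsp]; exact List.mem_cons_self) hc2)
        · exact List.mem_cons_of_mem _ (ih p (by rw [hsp]; exact List.mem_cons_of_mem _ hp2) hc)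

theorem split1_no_newline (s : List Char) (p : List Char) (hp : p ∈ split1 s) : '\n' ∉ p := by
  induction s generalizing p with
  | nil =>
    rw [show split1 [] = [[]] from rfl, List.mem_singleton] at hp
    subst hp; simp
  | cons a s ih =>
    simp only [split1] at hp
    split_ifs at hp with ha
    · rcases List.mem_cons.mp hp with rfl | hp2
      · simp
      · exact ih p hp2
    · cases hsp : split1 s with
      | nil => exact absurd hsp (split1_ne_nil s)
      | cons q t =>
        rw [hsp] at hp
        simp only [List.modifyHead] at hp
        rcases List.mem_cons.mp hp with rfl | hp2
        · intro hmem
          rcases List.mem_cons.mp hmem with heq | h2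
          · exact ha heq.symm
          · exact ih q (by rw [hsp]; exact List.mem_cons_self) h2
        · exact ih p (by rw [hsp]; exact List.mem_cons_of_mem _ hp2)

theorem split1_eq_single (x : List Char) (h : '\n' ∉ x) : split1 x = [x] := by
  induction x with
  | nil => rfl
  | cons c s ih =>
    have hcn : ¬ c = '\n' := fun hc => h (by rw [hc]; exact List.mem_cons_self)
    simp only [split1, if_neg hcn]
    rw [ih (fun hm => h (List.mem_cons_of_mem _ hm))]
    simp [List.modifyHead]

theorem split1_append (x s : List Char) (h : '\n' ∉ x) : split1 (x ++ '\n' :: s) = x :: split1 s := by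
  induction x with
  | nil => simp [split1]
  | cons c y ih =>
    have hcn : ¬ c = '\n' := fun hc => h (by rw [hc]; exact List.mem_cons_self)
    simp only [List.cons_append, split1, if_neg hcn]
    rw [ih (fun hm => h (List.mem_cons_of_mem _ hm))]
    simp [List.modifyHead]

theorem split1_intercalate (L : List (List Char)) (hne : L ≠ []) (h : ∀ p ∈ L, '\n' ∉ p) :
    split1 (List.intercalate ['\n'] L) = L := by
  induction L with
  | nil => exact absurd rfl hne
  | cons x L ih =>
    cases L with
    | nil => simpa [List.intercalate] using split1_eq_single x (h x List.mem_cons_self)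
    | cons y M =>
      have he : List.intercalate ['\n'] (x :: y :: M) = x ++ '\n' :: List.intercalate ['\n'] (y :: M) := by
        simp [List.intercalate]
      rw [he, split1_append _ _ (h x List.mem_cons_self)]
      rw [ih (by simp) (fun p hp => h p (List.mem_cons_of_mem _ hp))]

-- "copyright" as a character list (shared constant of both Pythons)
def cpyL : List Char := "copyright".toList

-- the non-blank lines of lic.lower() -- the same expression occurs in both Pythons
def pyLines (s : List Char) : List (List Char) :=
  (PySem.Chars.splitOn (PySem.Chars.lower s) ['\n']).filter (fun l => !(PySem.Chars.strip l).isEmpty)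

theorem lines_good (s : List Char) : ∀ p ∈ pyLines s,
    '\n' ∉ p ∧ PySem.Chars.lower p = p ∧ (PySem.Chars.strip p).isEmpty = false := by
  intro p hp
  rw [pyLines, splitOn_eq_split1] at hp
  obtain ⟨hmem, hblank⟩ := List.mem_filter.mp hp
  refine ⟨split1_no_newline _ _ hmem, ?_, by simpa using hblank⟩
  have hsub : ∀ c ∈ p, PySem.Chars.lowerChar c = c := by
    intro c hc
    have hcm : c ∈ PySem.Chars.lower s := mem_of_mem_split1 _ _ hmem c hc
    rw [PySem.Chars.lower] at hcm
    obtain ⟨c', _, rfl⟩ := List.mem_map.mp hcm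
    exact lowerChar_lowerChar c'
  rw [PySem.Chars.lower]
  calc List.map PySem.Chars.lowerChar p = List.map id p := List.map_congr_left hsub
    _ = p := List.map_id p

theorem lower_intercalate_fixed (L : List (List Char)) (h : ∀ p ∈ L, PySem.Chars.lower p = p) :
    PySem.Chars.lower (List.intercalate ['\n'] L) = List.intercalate ['\n'] L := by
  induction L with
  | nil => rfl
  | cons x L ih =>
    cases L with
    | nil => simpa [List.intercalate] using h x List.mem_cons_self
    | cons y M =>
      have he : List.intercalate ['\n'] (x :: y :: M) = x ++ '\n' :: List.intercalate ['\n'] (y :: M) := by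
        simp [List.intercalate]
      rw [he]
      have hx := h x List.mem_cons_self
      have hrest := ih (fun p hp => h p (List.mem_cons_of_mem _ hp))
      rw [PySem.Chars.lower] at hx hrest ⊢
      rw [List.map_append, hx, List.map_cons, hrest]
      rfl

-- rebuilding the tail of the lines and re-splitting gives back exactly those lines
theorem pyLines_join (L : List (List Char))
    (h : ∀ p ∈ L, '\n' ∉ p ∧ PySem.Chars.lower p = p ∧ (PySem.Chars.strip p).isEmpty = false) :
    pyLines (PySem.Chars.join ['\n'] L) = L := by
  cases L with
  | nil => rfl
  | cons x M =>
    rw [pyLines, PySem.Chars.join, lower_intercalate_fixed _ (fun p hp => (h p hp).2.1),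
        splitOn_eq_split1, split1_intercalate _ (by simp) (fun p hp => (h p hp).1)]
    exact List.filter_eq_self.mpr (fun p hp => by simp [(h p hp).2.2])

-- ===== PORT A =====
def check_template_py_chars (lic template : List Char) : Bool :=
  let licF := PySem.Chars.lower (lic.filter PySem.Chars.isalpha)
  let t := PySem.Chars.lower (template.filter PySem.Chars.isalpha)
  if t = licF then true
  else
    match hl : pyLines lic with
    | [] => false   -- Python raises IndexError at lines[0] here (excluded by Pre_)
    | l0 :: rest =>
      if PySem.Chars.isIn cpyL l0 then
        check_template_py_chars (PySem.Chars.join ['\n'] (PySem.List.slice (l0 :: rest) (some 1) none)) template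
      else false
termination_by (pyLines lic).length
decreasing_by
  have hs : PySem.List.slice (l0 :: rest) (some (1:Int)) none = rest := by
    simpa using PySem.List.slice_from_natCast (l0 :: rest) 1
  rw [hs, pyLines_join rest (fun p hp => lines_good lic p (hl ▸ List.mem_cons_of_mem _ hp)), hl]
  simp

def check_template_py (lic : String) (template : String) : Bool :=
  check_template_py_chars lic.toList template.toList

-- ===== PORT B =====
-- while m < len(lines) and "copyright" in lines[m]: m += 1
def countCopyrightPrefix (L : List (List Char)) : Nat :=
  match L with
  | [] => 0
  | l :: ls => if PySem.Chars.isIn cpyL l then countCopyrightPrefix ls + 1 else 0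

-- for k in range(m): compare, then peel alpha(lines[k]) off the front of suffix
def peelLoop (ls : List (List Char)) (suffix t : List Char) : Bool :=
  match ls with
  | [] => decide (suffix = t)
  | l :: rest =>
    if suffix = t then true
    else peelLoop rest
      (PySem.List.slice suffix (some (PySem.Chars.len (PySem.Chars.lower (l.filter PySem.Chars.isalpha)))) none) t

def check_template_py_alt_chars (lic template : List Char) : Bool :=
  let t := PySem.Chars.lower (template.filter PySem.Chars.isalpha)
  let lines := pyLines lic
  let m := countCopyrightPrefix lines
  let suffix := PySem.Chars.lower (lic.filter PySem.Chars.isalpha)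
  peelLoop (lines.take m) suffix t

def check_template_py_alt (lic : String) (template : String) : Bool :=
  check_template_py_alt_chars lic.toList template.toList

-- ===== PRECONDITION & SPEC =====
def concatAlphaLines (L : List (List Char)) : List Char :=
  (L.map (fun l => l.filter PySem.Chars.isalpha)).flatten

-- Pre_ excludes exactly the inputs on which the Python A raises IndexError (lines[0] on an empty
-- lines list): the template's alphabetic content is non-empty, every non-blank line of lic contains
-- "copyright", and no alphabetic line-suffix of lic equals it.  A returns a value everywhere else.
def Pre_check_template_py (lic : String) (template : String) : Prop :=
  ¬ (PySem.Chars.lower (template.toList.filter PySem.Chars.isalpha) ≠ [] ∧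
     (∀ l ∈ pyLines lic.toList, PySem.Chars.isIn cpyL l = true) ∧
     (∀ s ∈ (pyLines lic.toList).tails,
       concatAlphaLines s ≠ PySem.Chars.lower (template.toList.filter PySem.Chars.isalpha)))
instance (lic : String) (template : String) : Decidable (Pre_check_template_py lic template) := by
  unfold Pre_check_template_py; infer_instance

def pvWitness_check_template_py : String × String :=
  ("MIT License\nPermission is granted.", "mitlicense Permission is GRANTED")

def Spec_check_template_py (lic : String) (template : String) (out : Bool) : Prop :=
  out = check_template_py_alt lic template
instance (lic : String) (template : String) (out : Bool) : Decidable (Spec_check_template_py lic template out) := by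
  unfold Spec_check_template_py; infer_instance

-- ===== CLAIM (what is proved, stated in full; the proofs are below) =====
def Claim_equal_check_template_py : Prop := ∀ (lic : String) (template : String), Dom_check_template_py lic template → Pre_check_template_py lic template → Spec_check_template_py lic template (check_template_py lic template)

-- ===== LEMMAS AND PROOFS =====

theorem isalpha_lowerChar (c : Char) : PySem.Chars.isalpha (PySem.Chars.lowerChar c) = PySem.Chars.isalpha c := by
  have ha : ('a':Char).toNat = 97 := by decide
  have hz : ('z':Char).toNat = 122 := by decide
  have hAA : ('A':Char).toNat = 65 := by decide
  have hZZ : ('Z':Char).toNat = 90 := by decide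
  by_cases hU : ('A' ≤ c ∧ c ≤ 'Z')
  · have hcond : (decide ('A' ≤ c) && decide (c ≤ 'Z')) = true := by
      rw [← Bool.decide_and]; exact decide_eq_true hU
    obtain ⟨h1, h2⟩ := upper_toNat c hU
    have hv : (Char.ofNat (c.toNat + 32)).toNat = c.toNat + 32 := toNat_ofNat_valid _ (by omega)
    simp only [PySem.Chars.isalpha, PySem.Chars.lowerChar, PySem.Chars.isupper, PySem.Chars.islower, hcond, if_true, Bool.true_or]
    rw [Bool.eq_iff_iff]
    simp only [Bool.or_eq_true, Bool.and_eq_true, decide_eq_true_eq, char_le_iff, ha, hz, hAA, hZZ]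
    have h97 : 97 ≤ (Char.ofNat (c.toNat + 32)).toNat := by rw [hv]; omega
    have h122 : (Char.ofNat (c.toNat + 32)).toNat ≤ 122 := by rw [hv]; omega
    exact iff_of_true (Or.inr ⟨h97, h122⟩) trivial
  · have hcond : (decide ('A' ≤ c) && decide (c ≤ 'Z')) = false := by
      rw [← Bool.decide_and]; exact decide_eq_false hU
    simp only [PySem.Chars.isalpha, PySem.Chars.lowerChar, PySem.Chars.isupper, PySem.Chars.islower, hcond]
    rw [if_neg Bool.false_ne_true, hcond, Bool.false_or]

theorem not_isalpha_of_isspace (c : Char) (h : PySem.Chars.isspace c = true) : PySem.Chars.isalpha c = false := by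
  simp only [PySem.Chars.isspace, decide_eq_true_eq, Bool.or_eq_true, Bool.and_eq_true] at h
  simp only [PySem.Chars.isalpha, PySem.Chars.isupper, PySem.Chars.islower, Bool.or_eq_false_iff, Bool.and_eq_false_iff]
  have ha : ('a':Char).toNat = 97 := by decide
  have hz : ('z':Char).toNat = 122 := by decide
  have hAA : ('A':Char).toNat = 65 := by decide
  have hZZ : ('Z':Char).toNat = 90 := by decide
  constructor <;> simp only [decide_eq_false_iff_not, char_le_iff, not_le, ha, hz, hAA, hZZ] <;> omega

theorem filter_isalpha_split1 (s : List Char) :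
    ((split1 s).map (fun l => l.filter PySem.Chars.isalpha)).flatten = s.filter PySem.Chars.isalpha := by
  induction s with
  | nil => simp [split1]
  | cons c s ih =>
    simp only [split1]
    split_ifs with hc
    · subst hc
      simp only [List.map_cons, List.flatten_cons, ih, List.filter_cons]
      simp [show PySem.Chars.isalpha '\n' = false from rfl]
    · cases hsp : split1 s with
      | nil => exact absurd hsp (split1_ne_nil s)
      | cons q t =>
        rw [hsp] at ih
        simp only [List.modifyHead, List.map_cons, List.flatten_cons, List.filter_cons] at ih ⊢
        cases hca : PySem.Chars.isalpha c <;> simp_all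


-- the shape both programs share once the strings are resolved into lines:
-- walk the lines, comparing the remaining alphabetic content with t at each step
def goRef (L : List (List Char)) (t : List Char) : Bool :=
  match L with
  | [] => decide (t = [])
  | l :: ls => if concatAlphaLines (l :: ls) = t then true
      else if PySem.Chars.isIn cpyL l then goRef ls t else false

theorem lower_filter_isalpha (s : List Char) :
    PySem.Chars.lower (s.filter PySem.Chars.isalpha) = (PySem.Chars.lower s).filter PySem.Chars.isalpha := by
  rw [PySem.Chars.lower, PySem.Chars.lower, List.filter_map]
  congr 1
  exact (List.filter_congr (fun c _ => isalpha_lowerChar c)).symm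

theorem blank_no_alpha (l : List Char) (h : (PySem.Chars.strip l).isEmpty = true) :
    l.filter PySem.Chars.isalpha = [] := by
  have hsp : ∀ c ∈ l, PySem.Chars.isspace c = true := by
    have hnil : PySem.Chars.strip l = [] := List.isEmpty_iff.mp h
    rw [PySem.Chars.strip, PySem.Chars.rstrip] at hnil
    have h1 : List.dropWhile PySem.Chars.isspace (PySem.Chars.lstrip l).reverse = [] := by
      have h0 := congrArg List.reverse hnil
      simpa using h0
    have h2 : ∀ c ∈ (PySem.Chars.lstrip l).reverse, PySem.Chars.isspace c = true :=
      List.dropWhile_eq_nil_iff.mp h1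
    intro c hc
    rw [PySem.Chars.lstrip] at h2
    have hl : l = l.takeWhile PySem.Chars.isspace ++ l.dropWhile PySem.Chars.isspace :=
      (List.takeWhile_append_dropWhile).symm
    rw [hl] at hc
    rcases List.mem_append.mp hc with h3 | h3
    · exact List.mem_takeWhile_imp h3
    · exact h2 c (List.mem_reverse.mpr h3)
  exact List.filter_eq_nil_iff.mpr (fun c hc => by simp [not_isalpha_of_isspace c (hsp c hc)])

theorem flatten_filter_blank (P : List (List Char)) :
    ((P.filter (fun l => !(PySem.Chars.strip l).isEmpty)).map (fun l => l.filter PySem.Chars.isalpha)).flatten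
      = (P.map (fun l => l.filter PySem.Chars.isalpha)).flatten := by
  induction P with
  | nil => rfl
  | cons x P ih =>
    simp only [List.filter_cons]
    cases hb : (PySem.Chars.strip x).isEmpty with
    | true => simpa [blank_no_alpha x hb] using ih
    | false => simp [ih]

theorem alpha_eq_concat (s : List Char) :
    PySem.Chars.lower (s.filter PySem.Chars.isalpha) = concatAlphaLines (pyLines s) := by
  rw [lower_filter_isalpha, concatAlphaLines, pyLines, splitOn_eq_split1, flatten_filter_blank,
      filter_isalpha_split1]


theorem checkA_step (lic template : List Char) :
    check_template_py_chars lic template =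
      (if PySem.Chars.lower (template.filter PySem.Chars.isalpha)
          = PySem.Chars.lower (lic.filter PySem.Chars.isalpha) then true
       else
        match _hl : pyLines lic with
        | [] => false
        | l0 :: rest =>
          if PySem.Chars.isIn cpyL l0 then
            check_template_py_chars (PySem.Chars.join ['\n'] (PySem.List.slice (l0 :: rest) (some 1) none)) template
          else false) := by
  rw [check_template_py_chars]

theorem checkA_eq_goRef (n : Nat) : ∀ (lic template : List Char), (pyLines lic).length ≤ n →
    check_template_py_chars lic template
      = goRef (pyLines lic) (PySem.Chars.lower (template.filter PySem.Chars.isalpha)) := by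
  induction n using Nat.strong_induction_on with
  | _ n ih =>
    intro lic template h
    have hF := alpha_eq_concat lic
    rw [checkA_step]
    by_cases ht : PySem.Chars.lower (template.filter PySem.Chars.isalpha)
        = PySem.Chars.lower (lic.filter PySem.Chars.isalpha)
    · rw [if_pos ht]
      cases hL : pyLines lic with
      | nil =>
        have htnil : PySem.Chars.lower (template.filter PySem.Chars.isalpha) = [] := by
          rw [ht, hF, hL]; rfl
        simp [goRef, htnil]
      | cons l0 lrest =>
        have hc : concatAlphaLines (l0 :: lrest) = PySem.Chars.lower (template.filter PySem.Chars.isalpha) := by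
          rw [ht, hF, hL]
        rw [goRef, if_pos hc]
    · rw [if_neg ht]
      split
      · next heq =>
        rw [heq, goRef]
        have htne : ¬ PySem.Chars.lower (template.filter PySem.Chars.isalpha) = ([] : List Char) := by
          intro hnil; exact ht (by rw [hnil, hF, heq]; rfl)
        simp [htne]
      · next l0 rest heq =>
        rw [heq, goRef]
        have hcc : ¬ (concatAlphaLines (l0 :: rest) = PySem.Chars.lower (template.filter PySem.Chars.isalpha)) := by
          intro hx; exact ht (by rw [hF, heq]; exact hx.symm)
        rw [if_neg hcc]
        cases hcp : PySem.Chars.isIn cpyL l0 with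
        | false => simp
        | true =>
          rw [if_pos rfl]
          have hs : PySem.List.slice (l0 :: rest) (some (1:Int)) none = rest := by
            simpa using PySem.List.slice_from_natCast (l0 :: rest) 1
          have hgood : ∀ p ∈ rest, '\n' ∉ p ∧ PySem.Chars.lower p = p ∧ (PySem.Chars.strip p).isEmpty = false :=
            fun p hp => lines_good lic p (heq ▸ List.mem_cons_of_mem _ hp)
          have hlj := pyLines_join rest hgood
          have hlen0 : (pyLines lic).length = rest.length + 1 := by rw [heq]; rfl
          have hlt : rest.length < n := by omega
          have hlen : (pyLines (PySem.Chars.join ['\n'] rest)).length ≤ rest.length := by rw [hlj]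
          rw [hs, ih rest.length hlt _ template hlen, hlj]
          simp

theorem peelLoop_eq_goRef (L : List (List Char)) (t : List Char) :
    peelLoop (L.take (countCopyrightPrefix L)) (concatAlphaLines L) t = goRef L t := by
  induction L with
  | nil => simp [countCopyrightPrefix, peelLoop, goRef, concatAlphaLines, eq_comm]
  | cons l ls ih =>
    cases hcp : PySem.Chars.isIn cpyL l with
    | false =>
      simp only [countCopyrightPrefix, hcp, Bool.false_eq_true, if_false, List.take_zero, peelLoop, goRef]
      by_cases hq : concatAlphaLines (l :: ls) = t
      · simp [hq]
      · simp [hq]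
    | true =>
      simp only [countCopyrightPrefix, hcp, if_true, List.take_succ_cons, goRef]
      by_cases hq : concatAlphaLines (l :: ls) = t
      · simp [peelLoop, hq]
      · rw [peelLoop, if_neg hq, if_neg hq]
        have hlen : PySem.Chars.len (PySem.Chars.lower (l.filter PySem.Chars.isalpha))
            = ((l.filter PySem.Chars.isalpha).length : Int) := by
          rw [PySem.Chars.len_eq, PySem.Chars.lower, List.length_map]
        have hsplit : concatAlphaLines (l :: ls) = l.filter PySem.Chars.isalpha ++ concatAlphaLines ls := by
          simp [concatAlphaLines]
        rw [hlen, PySem.List.slice_from_natCast, hsplit, List.drop_left, ih]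

theorem ports_agree (lic template : List Char) :
    check_template_py_chars lic template = check_template_py_alt_chars lic template := by
  rw [checkA_eq_goRef (pyLines lic).length lic template (Nat.le_refl _)]
  simp only [check_template_py_alt_chars]
  rw [alpha_eq_concat lic, peelLoop_eq_goRef]

-- ===== VERDICT (by name: the statement is the Claim_ definition above) =====
theorem check_template_py_spec : Claim_equal_check_template_py := by
  intro lic template _ _
  unfold Spec_check_template_py check_template_py check_template_py_alt
  exact ports_agree lic.toList template.toList
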